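-- pv_equiv track=rewrite | github.com/ztanczos/aoc-2024 | 12/12_day_1.py | perimeter
-- ===== SOURCE A (Python) =====
-- def perimeter(plot):
--     min_x = min(plot, key=lambda p: p[0])[0]
--     min_y = min(plot, key=lambda p: p[1])[1]
--     max_x = max(plot, key=lambda p: p[0])[0]
--     max_y = max(plot, key=lambda p: p[1])[1]
--
--     perim = 0
--     for ray_x in range(min_x , max_x + 1):
--         is_in = False
--         side_count = 0
--         for ray_y in range(min_y, max_y + 2):
--             if (not is_in and (ray_x, ray_y) in plot) or (is_in and (ray_x, ray_y) not in plot):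
--                 is_in = not is_in
--                 side_count += 1
--
--         perim += side_count
--
--     for ray_y in range(min_y , max_y + 1):
--         is_in = False
--         side_count = 0
--         for ray_x in range(min_x, max_x + 2):
--             if (not is_in and (ray_x, ray_y) in plot) or (is_in and (ray_x, ray_y) not in plot):
--                 is_in = not is_in
--                 side_count += 1
--
--         perim += side_count
--     return perim
-- ===== SOURCE B (Python) =====
-- def perimeter(plot):
--     s = set(plot)
--     return sum(
--         4
--         - ((x - 1, y) in s)
--         - ((x + 1, y) in s)
--         - ((x, y - 1) in s)
--         - ((x, y + 1) in s)
--         for (x, y) in s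
--     )
-- ===== Notes on version B (the rewrite author's own statement) =====
-- stated objective: faster
-- what changed: Instead of scanning every row and column of the bounding box and counting inside/outside transitions, B sums over the cells themselves: each cell contributes 4 minus its number of orthogonal neighbors present in the set.
import Mathlib
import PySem

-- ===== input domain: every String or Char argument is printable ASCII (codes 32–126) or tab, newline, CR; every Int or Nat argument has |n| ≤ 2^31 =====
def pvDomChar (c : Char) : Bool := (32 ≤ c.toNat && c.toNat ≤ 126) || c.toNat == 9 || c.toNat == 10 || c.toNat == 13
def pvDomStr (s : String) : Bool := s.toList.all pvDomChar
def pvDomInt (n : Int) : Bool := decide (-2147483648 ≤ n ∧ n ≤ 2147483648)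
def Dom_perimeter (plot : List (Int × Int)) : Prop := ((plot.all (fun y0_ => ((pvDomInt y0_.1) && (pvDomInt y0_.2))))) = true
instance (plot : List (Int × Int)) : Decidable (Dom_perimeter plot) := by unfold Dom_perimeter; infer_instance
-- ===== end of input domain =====

-- B replaces A's bounding-box scanline transition counting by summing, per cell of the
-- set, 4 minus the number of orthogonal neighbors present (asymptotically faster).


-- ===== PORT A =====
def perimeter (plot : List (Int × Int)) : Int :=
  let min_x := ((PySem.List.min? plot (fun p => p.1)).getD (0, 0)).1
  let min_y := ((PySem.List.min? plot (fun p => p.2)).getD (0, 0)).2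
  let max_x := ((PySem.List.max? plot (fun p => p.1)).getD (0, 0)).1
  let max_y := ((PySem.List.max? plot (fun p => p.2)).getD (0, 0)).2
  let perim1 : Int := (PySem.List.pyRange min_x (max_x + 1) 1).foldl (fun perim ray_x =>
    let st := (PySem.List.pyRange min_y (max_y + 2) 1).foldl
      (fun (st : Bool × Int) ray_y =>
        if (!st.1 && decide ((ray_x, ray_y) ∈ plot)) || (st.1 && !decide ((ray_x, ray_y) ∈ plot))
        then (!st.1, st.2 + 1) else st) (false, 0)
    perim + st.2) 0
  let perim2 : Int := (PySem.List.pyRange min_y (max_y + 1) 1).foldl (fun perim ray_y =>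
    let st := (PySem.List.pyRange min_x (max_x + 2) 1).foldl
      (fun (st : Bool × Int) ray_x =>
        if (!st.1 && decide ((ray_x, ray_y) ∈ plot)) || (st.1 && !decide ((ray_x, ray_y) ∈ plot))
        then (!st.1, st.2 + 1) else st) (false, 0)
    perim + st.2) 0
  perim1 + perim2

-- ===== PORT B =====
def perimeter_alt (plot : List (Int × Int)) : Int :=
  let s : PySem.Set (Int × Int) := PySem.Set.ofList plot
  (s.map (fun p =>
    4 - (if (p.1 - 1, p.2) ∈ s then (1 : Int) else 0)
      - (if (p.1 + 1, p.2) ∈ s then (1 : Int) else 0)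
      - (if (p.1, p.2 - 1) ∈ s then (1 : Int) else 0)
      - (if (p.1, p.2 + 1) ∈ s then (1 : Int) else 0))).sum

-- ===== PRECONDITION & SPEC =====
-- Pre_ excludes only the empty list, on which Python A raises ValueError (min() of empty).
def Pre_perimeter (plot : List (Int × Int)) : Prop := plot ≠ []
instance (plot : List (Int × Int)) : Decidable (Pre_perimeter plot) := by unfold Pre_perimeter; infer_instance
def pvWitness_perimeter : (List (Int × Int)) := [(0, 0), (0, 1), (1, 0)]

def Spec_perimeter (plot : List (Int × Int)) (out : Int) : Prop := out = perimeter_alt plot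
instance (plot : List (Int × Int)) (out : Int) : Decidable (Spec_perimeter plot out) := by unfold Spec_perimeter; infer_instance

-- ===== CLAIM =====
def Claim_equal_perimeter : Prop := ∀ (plot : List (Int × Int)), Dom_perimeter plot → Pre_perimeter plot → Spec_perimeter plot (perimeter plot)

-- ===== LEMMAS AND PROOFS =====

-- boolean transition indicator along a line
def pvTC (μ : Int → Bool) (y : Int) : Int := if μ y ≠ μ (y - 1) then 1 else 0

lemma pv_sum_pyRange (g : Int → Int) (a b : Int) :
    ((PySem.List.pyRange a b 1).map g).sum = ∑ x ∈ Finset.Ico a b, g x := by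
  induction hn : (b - a).toNat generalizing a with
  | zero =>
    rw [PySem.List.pyRange_one_eq_nil (by omega), Finset.Ico_eq_empty (by simp; omega)]
    simp
  | succ n ih =>
    have hlt : a < b := by omega
    rw [PySem.List.pyRange_one_cons hlt, List.map_cons, List.sum_cons, ih (a + 1) (by omega),
        ← Finset.insert_Ico_add_one_left_eq_Ico hlt, Finset.sum_insert (by simp)]

lemma pv_trans_fold (μ : Int → Bool) (a b c : Int) (hab : a ≤ b) :
    (PySem.List.pyRange a b 1).foldl
      (fun (st : Bool × Int) y =>
        if (!st.1 && μ y) || (st.1 && !μ y) then (!st.1, st.2 + 1) else st)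
      (μ (a - 1), c)
    = (μ (b - 1), c + ∑ y ∈ Finset.Ico a b, pvTC μ y) := by
  induction hn : (b - a).toNat generalizing a c with
  | zero =>
    have : a = b := by omega
    subst this
    rw [PySem.List.pyRange_one_eq_nil le_rfl]
    simp
  | succ n ih =>
    have hlt : a < b := by omega
    rw [PySem.List.pyRange_one_cons hlt, List.foldl_cons]
    have hstep : (if (!(μ (a - 1), c).1 && μ a || (μ (a - 1), c).1 && !μ a) = true
          then (!(μ (a - 1), c).1, (μ (a - 1), c).2 + 1) else (μ (a - 1), c))
        = (μ ((a + 1) - 1), c + pvTC μ a) := by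
      cases h1 : μ a <;> cases h2 : μ (a - 1) <;> simp [pvTC, h1, h2]
    rw [hstep, ih (a + 1) (c + pvTC μ a) (by omega) (by omega),
        ← Finset.insert_Ico_add_one_left_eq_Ico hlt, Finset.sum_insert (by simp)]
    simp [add_assoc]

lemma pv_tc_split (μ : Int → Bool) (y : Int) :
    pvTC μ y = (if μ y = true ∧ μ (y - 1) = false then (1 : Int) else 0)
             + (if μ (y - 1) = true ∧ μ y = false then 1 else 0) := by
  cases h1 : μ y <;> cases h2 : μ (y - 1) <;> simp [pvTC, h1, h2]

lemma pv_col_fiber (plot : List (Int × Int)) (x a b : Int) (w : Int × Int → Int)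
    (H : ∀ p ∈ plot, p.1 = x → a ≤ p.2 ∧ p.2 < b) :
    ∑ y ∈ Finset.Ico a b, (if (x, y) ∈ plot then w (x, y) else 0)
    = ∑ p ∈ plot.toFinset.filter (fun p => p.1 = x), w p := by
  rw [← Finset.sum_filter]
  refine Finset.sum_nbij' (i := fun y => (x, y)) (j := fun p => p.2) ?_ ?_ ?_ ?_ ?_
  · intro y hy
    simp only [Finset.mem_filter, Finset.mem_Ico, List.mem_toFinset] at *
    exact ⟨hy.2, trivial⟩
  · intro p hp
    simp only [Finset.mem_filter, Finset.mem_Ico, List.mem_toFinset] at *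
    obtain ⟨hp1, hp2⟩ := hp
    have := H p hp1 hp2
    constructor
    · omega
    · rw [show (x, p.2) = p from by rw [← hp2]]
      exact hp1
  · intro y _; rfl
  · intro p hp
    simp only [Finset.mem_filter, List.mem_toFinset] at hp
    rw [← hp.2]
  · intro y _; rfl

lemma pv_row_fiber (plot : List (Int × Int)) (y a b : Int) (w : Int × Int → Int)
    (H : ∀ p ∈ plot, p.2 = y → a ≤ p.1 ∧ p.1 < b) :
    ∑ x ∈ Finset.Ico a b, (if (x, y) ∈ plot then w (x, y) else 0)
    = ∑ p ∈ plot.toFinset.filter (fun p => p.2 = y), w p := by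
  rw [← Finset.sum_filter]
  refine Finset.sum_nbij' (i := fun x => (x, y)) (j := fun p => p.1) ?_ ?_ ?_ ?_ ?_
  · intro x hx
    simp only [Finset.mem_filter, Finset.mem_Ico, List.mem_toFinset] at *
    exact ⟨hx.2, trivial⟩
  · intro p hp
    simp only [Finset.mem_filter, Finset.mem_Ico, List.mem_toFinset] at *
    obtain ⟨hp1, hp2⟩ := hp
    have := H p hp1 hp2
    constructor
    · omega
    · rw [show (p.1, y) = p from by rw [← hp2]]
      exact hp1
  · intro x _; rfl
  · intro p hp
    simp only [Finset.mem_filter, List.mem_toFinset] at hp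
    rw [← hp.2]
  · intro x _; rfl

lemma pv_shift_col (plot : List (Int × Int)) (x a b : Int) :
    ∑ y ∈ Finset.Ico a b, (if (x, y - 1) ∈ plot ∧ ¬ (x, y) ∈ plot then (1 : Int) else 0)
    = ∑ z ∈ Finset.Ico (a - 1) (b - 1), (if (x, z) ∈ plot ∧ ¬ (x, z + 1) ∈ plot then (1 : Int) else 0) := by
  rw [show Finset.Ico a b = (Finset.Ico (a - 1) (b - 1)).map (addRightEmbedding 1) from by
        rw [Finset.map_add_right_Ico]; congr 1 <;> ring,
      Finset.sum_map]
  refine Finset.sum_congr rfl fun z _ => ?_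
  simp [addRightEmbedding]

lemma pv_shift_row (plot : List (Int × Int)) (y a b : Int) :
    ∑ x ∈ Finset.Ico a b, (if (x - 1, y) ∈ plot ∧ ¬ (x, y) ∈ plot then (1 : Int) else 0)
    = ∑ z ∈ Finset.Ico (a - 1) (b - 1), (if (z, y) ∈ plot ∧ ¬ (z + 1, y) ∈ plot then (1 : Int) else 0) := by
  rw [show Finset.Ico a b = (Finset.Ico (a - 1) (b - 1)).map (addRightEmbedding 1) from by
        rw [Finset.map_add_right_Ico]; congr 1 <;> ring,
      Finset.sum_map]
  refine Finset.sum_congr rfl fun z _ => ?_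
  simp [addRightEmbedding]

lemma pv_and_ite (P Q : Prop) [Decidable P] [Decidable Q] :
    (if P ∧ ¬ Q then (1 : Int) else 0) = (if P then (if Q then 0 else 1) else 0) := by
  by_cases hp : P <;> by_cases hq : Q <;> simp [hp, hq]

lemma pv_colsum (plot : List (Int × Int)) (x my My : Int)
    (Hy : ∀ p ∈ plot, my ≤ p.2 ∧ p.2 ≤ My) :
    ∑ y ∈ Finset.Ico my (My + 2), pvTC (fun y => decide ((x, y) ∈ plot)) y
    = ∑ p ∈ plot.toFinset.filter (fun p => p.1 = x),
        ((if (p.1, p.2 - 1) ∈ plot then 0 else 1) + (if (p.1, p.2 + 1) ∈ plot then 0 else 1)) := by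
  simp only [pv_tc_split, decide_eq_true_eq, decide_eq_false_iff_not]
  rw [Finset.sum_add_distrib]
  have h1 : ∑ y ∈ Finset.Ico my (My + 2),
      (if (x, y) ∈ plot ∧ ¬ (x, y - 1) ∈ plot then (1 : Int) else 0)
      = ∑ p ∈ plot.toFinset.filter (fun p => p.1 = x),
          (if (p.1, p.2 - 1) ∈ plot then (0 : Int) else 1) := by
    simp only [pv_and_ite]
    exact pv_col_fiber plot x my (My + 2)
      (fun p => if (p.1, p.2 - 1) ∈ plot then 0 else 1)
      (fun p hp _ => ⟨(Hy p hp).1, by have := (Hy p hp).2; omega⟩)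
  have h2 : ∑ y ∈ Finset.Ico my (My + 2),
      (if (x, y - 1) ∈ plot ∧ ¬ (x, y) ∈ plot then (1 : Int) else 0)
      = ∑ p ∈ plot.toFinset.filter (fun p => p.1 = x),
          (if (p.1, p.2 + 1) ∈ plot then (0 : Int) else 1) := by
    rw [pv_shift_col]
    simp only [pv_and_ite]
    rw [show My + 2 - 1 = My + 1 from by ring]
    exact pv_col_fiber plot x (my - 1) (My + 1)
      (fun p => if (p.1, p.2 + 1) ∈ plot then 0 else 1)
      (fun p hp _ => ⟨by have := (Hy p hp).1; omega, by have := (Hy p hp).2; omega⟩)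
  rw [h1, h2, ← Finset.sum_add_distrib]

lemma pv_rowsum (plot : List (Int × Int)) (y mx Mx : Int)
    (Hx : ∀ p ∈ plot, mx ≤ p.1 ∧ p.1 ≤ Mx) :
    ∑ x ∈ Finset.Ico mx (Mx + 2), pvTC (fun x => decide ((x, y) ∈ plot)) x
    = ∑ p ∈ plot.toFinset.filter (fun p => p.2 = y),
        ((if (p.1 - 1, p.2) ∈ plot then 0 else 1) + (if (p.1 + 1, p.2) ∈ plot then 0 else 1)) := by
  simp only [pv_tc_split, decide_eq_true_eq, decide_eq_false_iff_not]
  rw [Finset.sum_add_distrib]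
  have h1 : ∑ x ∈ Finset.Ico mx (Mx + 2),
      (if (x, y) ∈ plot ∧ ¬ (x - 1, y) ∈ plot then (1 : Int) else 0)
      = ∑ p ∈ plot.toFinset.filter (fun p => p.2 = y),
          (if (p.1 - 1, p.2) ∈ plot then (0 : Int) else 1) := by
    simp only [pv_and_ite]
    exact pv_row_fiber plot y mx (Mx + 2)
      (fun p => if (p.1 - 1, p.2) ∈ plot then 0 else 1)
      (fun p hp _ => ⟨(Hx p hp).1, by have := (Hx p hp).2; omega⟩)
  have h2 : ∑ x ∈ Finset.Ico mx (Mx + 2),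
      (if (x - 1, y) ∈ plot ∧ ¬ (x, y) ∈ plot then (1 : Int) else 0)
      = ∑ p ∈ plot.toFinset.filter (fun p => p.2 = y),
          (if (p.1 + 1, p.2) ∈ plot then (0 : Int) else 1) := by
    rw [pv_shift_row]
    simp only [pv_and_ite]
    rw [show Mx + 2 - 1 = Mx + 1 from by ring]
    exact pv_row_fiber plot y (mx - 1) (Mx + 1)
      (fun p => if (p.1 + 1, p.2) ∈ plot then 0 else 1)
      (fun p hp _ => ⟨by have := (Hx p hp).1; omega, by have := (Hx p hp).2; omega⟩)
  rw [h1, h2, ← Finset.sum_add_distrib]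

lemma pv_alt_sum (plot : List (Int × Int)) :
    perimeter_alt plot = ∑ p ∈ plot.toFinset,
      ((4 : Int) - (if (p.1 - 1, p.2) ∈ plot then 1 else 0) - (if (p.1 + 1, p.2) ∈ plot then 1 else 0)
         - (if (p.1, p.2 - 1) ∈ plot then 1 else 0) - (if (p.1, p.2 + 1) ∈ plot then 1 else 0)) := by
  unfold perimeter_alt
  simp only [PySem.Set.mem_ofList]
  rw [← List.sum_toFinset _ (PySem.Set.nodup_ofList plot),
      show (PySem.Set.ofList plot).toFinset = plot.toFinset from by
        ext q; simp [PySem.Set.mem_ofList]]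

-- ===== VERDICT =====
theorem perimeter_spec : Claim_equal_perimeter := by
  intro plot _ hpre
  unfold Spec_perimeter
  obtain ⟨q, hq⟩ : ∃ q, q ∈ plot := List.exists_mem_of_ne_nil plot hpre
  cases hminx : PySem.List.min? plot (fun p => p.1) with
  | none => exact absurd ((PySem.List.min?_eq_none_iff _ _).1 hminx) hpre
  | some pmx =>
  cases hminy : PySem.List.min? plot (fun p => p.2) with
  | none => exact absurd ((PySem.List.min?_eq_none_iff _ _).1 hminy) hpre
  | some pmy =>
  cases hmaxx : PySem.List.max? plot (fun p => p.1) with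
  | none => exact absurd ((PySem.List.max?_eq_none_iff _ _).1 hmaxx) hpre
  | some pMx =>
  cases hmaxy : PySem.List.max? plot (fun p => p.2) with
  | none => exact absurd ((PySem.List.max?_eq_none_iff _ _).1 hmaxy) hpre
  | some pMy =>
  have hmx : ∀ p ∈ plot, pmx.1 ≤ p.1 := PySem.List.min?_isMin hminx
  have hmy : ∀ p ∈ plot, pmy.2 ≤ p.2 := PySem.List.min?_isMin hminy
  have hMx : ∀ p ∈ plot, p.1 ≤ pMx.1 := PySem.List.max?_isMax hmaxx
  have hMy : ∀ p ∈ plot, p.2 ≤ pMy.2 := PySem.List.max?_isMax hmaxy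
  have hyy : pmy.2 ≤ pMy.2 := le_trans (hmy q hq) (hMy q hq)
  have hxx : pmx.1 ≤ pMx.1 := le_trans (hmx q hq) (hMx q hq)
  rw [pv_alt_sum]
  simp only [perimeter, hminx, hminy, hmaxx, hmaxy, Option.getD_some]
  rw [PySem.List.foldl_add, PySem.List.foldl_add, pv_sum_pyRange, pv_sum_pyRange]
  have hcol : ∀ x : Int,
      ((PySem.List.pyRange pmy.2 (pMy.2 + 2) 1).foldl
        (fun (st : Bool × Int) ray_y =>
          if (!st.1 && decide ((x, ray_y) ∈ plot)) || (st.1 && !decide ((x, ray_y) ∈ plot))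
          then (!st.1, st.2 + 1) else st) (false, 0)).2
      = ∑ p ∈ plot.toFinset.filter (fun p => p.1 = x),
          ((if (p.1, p.2 - 1) ∈ plot then 0 else 1) + (if (p.1, p.2 + 1) ∈ plot then 0 else 1)) := by
    intro x
    have h0 : decide ((x, pmy.2 - 1) ∈ plot) = false := by
      simp only [decide_eq_false_iff_not]
      intro hmem
      have := hmy _ hmem
      omega
    rw [show ((false : Bool), (0 : Int)) = (decide ((x, pmy.2 - 1) ∈ plot), (0 : Int)) from by
          rw [h0],
        pv_trans_fold (fun y => decide ((x, y) ∈ plot)) pmy.2 (pMy.2 + 2) 0 (by omega)]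
    simpa using pv_colsum plot x pmy.2 pMy.2 (fun p hp => ⟨hmy p hp, hMy p hp⟩)
  have hrow : ∀ y : Int,
      ((PySem.List.pyRange pmx.1 (pMx.1 + 2) 1).foldl
        (fun (st : Bool × Int) ray_x =>
          if (!st.1 && decide ((ray_x, y) ∈ plot)) || (st.1 && !decide ((ray_x, y) ∈ plot))
          then (!st.1, st.2 + 1) else st) (false, 0)).2
      = ∑ p ∈ plot.toFinset.filter (fun p => p.2 = y),
          ((if (p.1 - 1, p.2) ∈ plot then 0 else 1) + (if (p.1 + 1, p.2) ∈ plot then 0 else 1)) := by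
    intro y
    have h0 : decide ((pmx.1 - 1, y) ∈ plot) = false := by
      simp only [decide_eq_false_iff_not]
      intro hmem
      have := hmx _ hmem
      omega
    rw [show ((false : Bool), (0 : Int)) = (decide ((pmx.1 - 1, y) ∈ plot), (0 : Int)) from by
          rw [h0],
        pv_trans_fold (fun x => decide ((x, y) ∈ plot)) pmx.1 (pMx.1 + 2) 0 (by omega)]
    simpa using pv_rowsum plot y pmx.1 pMx.1 (fun p hp => ⟨hmx p hp, hMx p hp⟩)
  simp only [hcol, hrow, zero_add]
  rw [Finset.sum_fiberwise_of_maps_to (g := fun p : Int × Int => p.1)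
        (fun p hp => by
          simp only [List.mem_toFinset] at hp
          simp only [Finset.mem_Ico]
          exact ⟨hmx p hp, by have := hMx p hp; omega⟩),
      Finset.sum_fiberwise_of_maps_to (g := fun p : Int × Int => p.2)
        (fun p hp => by
          simp only [List.mem_toFinset] at hp
          simp only [Finset.mem_Ico]
          exact ⟨hmy p hp, by have := hMy p hp; omega⟩),
      ← Finset.sum_add_distrib]
  refine Finset.sum_congr rfl fun p _ => ?_
  split_ifs <;> omega
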